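-- pv_equiv track=rewrite | github.com/prichstrib2/n4jquery | app.py | _generate_vector_search_template
-- ===== SOURCE A (Python) =====
-- def _generate_vector_search_template(query_text: str, top_k: int) -> str:
--     """Generate a template for vector similarity search."""
--     # Base vector search query
--     template = f"""
--     // Vector similarity search on Article nodes using the article_content_index
--     CALL db.index.vector.queryNodes('article_content_index', {top_k}, $embedding)
--     YIELD node, score
--     """
--
--     # Check query intent to customize return clause
--     lower_query = query_text.lower()
--
--     if any(kw in lower_query for kw in ["topic", "about", "related to", "concerning", "regarding"]):
--         template += """
--         // Get topics associated with the articles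
--         WITH node, score
--         MATCH (node)-[:HAS_TOPIC]->(t:Topic)
--         RETURN node.content AS article, collect(DISTINCT t.name) AS topics, score
--         ORDER BY score DESC
--         """
--     elif any(kw in lower_query for kw in ["author", "written by", "wrote"]):
--         template += """
--         // Get authors of the articles
--         WITH node, score
--         MATCH (a:Author)-[:WROTE]->(node)
--         RETURN node.content AS article, collect(DISTINCT a.id) AS authors, score
--         ORDER BY score DESC
--         """
--     elif any(kw in lower_query for kw in ["person", "people", "who", "mentions"]):
--         template += """
--         // Get people mentioned in the articles
--         WITH node, score
--         MATCH (node)-[:MENTIONS_PERSON]->(p:Person)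
--         RETURN node.content AS article, collect(DISTINCT p.name) AS mentioned_people, score
--         ORDER BY score DESC
--         """
--     elif any(kw in lower_query for kw in ["entity", "organization", "company"]):
--         template += """
--         // Get entities mentioned in the articles
--         WITH node, score
--         MATCH (node)-[:MENTIONS_ENTITY]->(e:Entity)
--         RETURN node.content AS article, collect(DISTINCT e.name) AS mentioned_entities, score
--         ORDER BY score DESC
--         """
--     else:
--         # Default comprehensive return
--         template += f"""
--         // Default return with topics, authors, and entities
--         WITH node, score
--         OPTIONAL MATCH (node)-[:HAS_TOPIC]->(t:Topic)
--         OPTIONAL MATCH (a:Author)-[:WROTE]->(node)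
--         OPTIONAL MATCH (node)-[:MENTIONS_ENTITY]->(e:Entity)
--         RETURN node.content AS article,
--                collect(DISTINCT t.name) AS topics,
--                collect(DISTINCT a.id) AS authors,
--                collect(DISTINCT e.name) AS entities,
--                score
--         ORDER BY score DESC
--         LIMIT {top_k}
--         """
--
--     return template
-- ===== SOURCE B (Python) =====
-- def _generate_vector_search_template(query_text: str, top_k: int) -> str:
--     """Generate a template for vector similarity search.
--
--     Computes the set of ALL matching keyword groups in one comprehension,
--     then selects the lowest-numbered one (min), instead of short-circuiting
--     through an if/elif chain.
--     """
--     base = f"""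
--     // Vector similarity search on Article nodes using the article_content_index
--     CALL db.index.vector.queryNodes('article_content_index', {top_k}, $embedding)
--     YIELD node, score
--     """
--     groups = [
--         ["topic", "about", "related to", "concerning", "regarding"],
--         ["author", "written by", "wrote"],
--         ["person", "people", "who", "mentions"],
--         ["entity", "organization", "company"],
--     ]
--     suffixes = [
--         """
--         // Get topics associated with the articles
--         WITH node, score
--         MATCH (node)-[:HAS_TOPIC]->(t:Topic)
--         RETURN node.content AS article, collect(DISTINCT t.name) AS topics, score
--         ORDER BY score DESC
--         """,
--         """
--         // Get authors of the articles
--         WITH node, score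
--         MATCH (a:Author)-[:WROTE]->(node)
--         RETURN node.content AS article, collect(DISTINCT a.id) AS authors, score
--         ORDER BY score DESC
--         """,
--         """
--         // Get people mentioned in the articles
--         WITH node, score
--         MATCH (node)-[:MENTIONS_PERSON]->(p:Person)
--         RETURN node.content AS article, collect(DISTINCT p.name) AS mentioned_people, score
--         ORDER BY score DESC
--         """,
--         """
--         // Get entities mentioned in the articles
--         WITH node, score
--         MATCH (node)-[:MENTIONS_ENTITY]->(e:Entity)
--         RETURN node.content AS article, collect(DISTINCT e.name) AS mentioned_entities, score
--         ORDER BY score DESC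
--         """,
--     ]
--     lq = query_text.lower()
--     matched = [i for i, kws in enumerate(groups) if any(kw in lq for kw in kws)]
--     idx = min(matched, default=len(suffixes))
--     if idx < len(suffixes):
--         return base + suffixes[idx]
--     return base + f"""
--         // Default return with topics, authors, and entities
--         WITH node, score
--         OPTIONAL MATCH (node)-[:HAS_TOPIC]->(t:Topic)
--         OPTIONAL MATCH (a:Author)-[:WROTE]->(node)
--         OPTIONAL MATCH (node)-[:MENTIONS_ENTITY]->(e:Entity)
--         RETURN node.content AS article,
--                collect(DISTINCT t.name) AS topics,
--                collect(DISTINCT a.id) AS authors,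
--                collect(DISTINCT e.name) AS entities,
--                score
--         ORDER BY score DESC
--         LIMIT {top_k}
--         """
-- ===== Notes on version B (the rewrite author's own statement) =====
-- stated objective: alternative
-- what changed: Instead of an if/elif chain that short-circuits at the first matching keyword group, B computes the list of ALL matching group indices in one comprehension, takes the minimum (with a default past the table), and indexes into a suffix list.
import Mathlib
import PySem

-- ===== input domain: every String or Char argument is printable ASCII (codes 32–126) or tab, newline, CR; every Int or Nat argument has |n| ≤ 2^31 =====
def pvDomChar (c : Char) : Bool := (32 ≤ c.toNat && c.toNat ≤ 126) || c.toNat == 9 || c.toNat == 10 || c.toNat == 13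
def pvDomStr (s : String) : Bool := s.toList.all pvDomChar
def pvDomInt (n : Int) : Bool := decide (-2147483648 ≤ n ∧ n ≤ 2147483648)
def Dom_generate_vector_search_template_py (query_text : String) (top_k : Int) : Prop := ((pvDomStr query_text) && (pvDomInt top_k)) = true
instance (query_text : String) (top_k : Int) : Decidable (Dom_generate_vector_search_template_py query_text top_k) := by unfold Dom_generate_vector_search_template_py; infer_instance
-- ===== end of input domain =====

-- B replaces A's short-circuiting if/elif chain by computing all matching keyword-group indices and selecting the minimum (objective: alternative).

-- ===== PORT A =====
def generate_vector_search_template_py (query_text : String) (top_k : Int) : String :=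
  let template := "\n    // Vector similarity search on Article nodes using the article_content_index\n    CALL db.index.vector.queryNodes('article_content_index', " ++ PySem.Int.toStr top_k ++ ", $embedding) \n    YIELD node, score\n    "
  let lower_query := PySem.Str.lower query_text
  if ["topic", "about", "related to", "concerning", "regarding"].any (fun kw => PySem.Str.isIn kw lower_query) then
    template ++ "\n        // Get topics associated with the articles\n        WITH node, score\n        MATCH (node)-[:HAS_TOPIC]->(t:Topic)\n        RETURN node.content AS article, collect(DISTINCT t.name) AS topics, score\n        ORDER BY score DESC\n        "
  else if ["author", "written by", "wrote"].any (fun kw => PySem.Str.isIn kw lower_query) then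
    template ++ "\n        // Get authors of the articles\n        WITH node, score\n        MATCH (a:Author)-[:WROTE]->(node)\n        RETURN node.content AS article, collect(DISTINCT a.id) AS authors, score\n        ORDER BY score DESC\n        "
  else if ["person", "people", "who", "mentions"].any (fun kw => PySem.Str.isIn kw lower_query) then
    template ++ "\n        // Get people mentioned in the articles\n        WITH node, score\n        MATCH (node)-[:MENTIONS_PERSON]->(p:Person)\n        RETURN node.content AS article, collect(DISTINCT p.name) AS mentioned_people, score\n        ORDER BY score DESC\n        "
  else if ["entity", "organization", "company"].any (fun kw => PySem.Str.isIn kw lower_query) then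
    template ++ "\n        // Get entities mentioned in the articles\n        WITH node, score\n        MATCH (node)-[:MENTIONS_ENTITY]->(e:Entity)\n        RETURN node.content AS article, collect(DISTINCT e.name) AS mentioned_entities, score\n        ORDER BY score DESC\n        "
  else
    template ++ "\n        // Default return with topics, authors, and entities\n        WITH node, score\n        OPTIONAL MATCH (node)-[:HAS_TOPIC]->(t:Topic)\n        OPTIONAL MATCH (a:Author)-[:WROTE]->(node)\n        OPTIONAL MATCH (node)-[:MENTIONS_ENTITY]->(e:Entity)\n        RETURN node.content AS article, \n               collect(DISTINCT t.name) AS topics,\n               collect(DISTINCT a.id) AS authors,\n               collect(DISTINCT e.name) AS entities,\n               score\n        ORDER BY score DESC\n        LIMIT " ++ PySem.Int.toStr top_k ++ "\n        "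

-- ===== PORT B =====
def pvGroups : List (List String) :=
  [ ["topic", "about", "related to", "concerning", "regarding"],
    ["author", "written by", "wrote"],
    ["person", "people", "who", "mentions"],
    ["entity", "organization", "company"] ]

def pvSuffixes : List String :=
  [ "\n        // Get topics associated with the articles\n        WITH node, score\n        MATCH (node)-[:HAS_TOPIC]->(t:Topic)\n        RETURN node.content AS article, collect(DISTINCT t.name) AS topics, score\n        ORDER BY score DESC\n        ",
    "\n        // Get authors of the articles\n        WITH node, score\n        MATCH (a:Author)-[:WROTE]->(node)\n        RETURN node.content AS article, collect(DISTINCT a.id) AS authors, score\n        ORDER BY score DESC\n        ",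
    "\n        // Get people mentioned in the articles\n        WITH node, score\n        MATCH (node)-[:MENTIONS_PERSON]->(p:Person)\n        RETURN node.content AS article, collect(DISTINCT p.name) AS mentioned_people, score\n        ORDER BY score DESC\n        ",
    "\n        // Get entities mentioned in the articles\n        WITH node, score\n        MATCH (node)-[:MENTIONS_ENTITY]->(e:Entity)\n        RETURN node.content AS article, collect(DISTINCT e.name) AS mentioned_entities, score\n        ORDER BY score DESC\n        " ]

def generate_vector_search_template_py_alt (query_text : String) (top_k : Int) : String :=
  let base := "\n    // Vector similarity search on Article nodes using the article_content_index\n    CALL db.index.vector.queryNodes('article_content_index', " ++ PySem.Int.toStr top_k ++ ", $embedding) \n    YIELD node, score\n    "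
  let lq := PySem.Str.lower query_text
  -- matched = [i for i, kws in enumerate(groups) if any(kw in lq for kw in kws)]
  let matched : List Int :=
    ((PySem.List.enumerate pvGroups).filter (fun p => p.2.any (fun kw => PySem.Str.isIn kw lq))).map Prod.fst
  -- idx = min(matched, default=len(suffixes)); Python's min over a nonempty list = fold of min from its head
  let idx : Int := match matched with | [] => (pvSuffixes.length : Int) | x :: xs => xs.foldl min x
  if idx < (pvSuffixes.length : Int) then
    -- suffixes[idx]: idx is a valid index here, .getD "" is never the result
    base ++ (PySem.List.pyGet? pvSuffixes idx).getD ""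
  else
    base ++ "\n        // Default return with topics, authors, and entities\n        WITH node, score\n        OPTIONAL MATCH (node)-[:HAS_TOPIC]->(t:Topic)\n        OPTIONAL MATCH (a:Author)-[:WROTE]->(node)\n        OPTIONAL MATCH (node)-[:MENTIONS_ENTITY]->(e:Entity)\n        RETURN node.content AS article, \n               collect(DISTINCT t.name) AS topics,\n               collect(DISTINCT a.id) AS authors,\n               collect(DISTINCT e.name) AS entities,\n               score\n        ORDER BY score DESC\n        LIMIT " ++ PySem.Int.toStr top_k ++ "\n        "

-- ===== PRECONDITION & SPEC =====
def Spec_generate_vector_search_template_py (query_text : String) (top_k : Int) (out : String) : Prop := out = generate_vector_search_template_py_alt query_text top_k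
instance (query_text : String) (top_k : Int) (out : String) : Decidable (Spec_generate_vector_search_template_py query_text top_k out) := by unfold Spec_generate_vector_search_template_py; infer_instance

-- ===== CLAIM (what is proved, stated in full; the proofs are below) =====
def Claim_equal_generate_vector_search_template_py : Prop := ∀ (query_text : String) (top_k : Int), Dom_generate_vector_search_template_py query_text top_k → Spec_generate_vector_search_template_py query_text top_k (generate_vector_search_template_py query_text top_k)

-- ===== LEMMAS AND PROOFS =====

-- ===== VERDICT (by name: the statement is the Claim_ definition above) =====
theorem generate_vector_search_template_py_spec : Claim_equal_generate_vector_search_template_py := by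
  intro q k _
  unfold Spec_generate_vector_search_template_py generate_vector_search_template_py generate_vector_search_template_py_alt pvGroups pvSuffixes
  simp only [PySem.List.enumerate_cons, PySem.List.enumerate_nil, List.filter_cons, List.filter_nil]
  generalize (["topic", "about", "related to", "concerning", "regarding"].any (fun kw => PySem.Str.isIn kw (PySem.Str.lower q))) = b0
  generalize (["author", "written by", "wrote"].any (fun kw => PySem.Str.isIn kw (PySem.Str.lower q))) = b1
  generalize (["person", "people", "who", "mentions"].any (fun kw => PySem.Str.isIn kw (PySem.Str.lower q))) = b2
  generalize (["entity", "organization", "company"].any (fun kw => PySem.Str.isIn kw (PySem.Str.lower q))) = b3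
  cases b0 <;> cases b1 <;> cases b2 <;> cases b3 <;>
    simp [PySem.List.pyGet?, PySem.List.pyIdx?]
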